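-- pv_equiv track=rewrite | github.com/KodCode-AI/kodcode | demo/SFT_KodCode_leetcode_100_1741214688/cross_verification_SFT_KodCode_leetcode_100_1741214688/Leetcode_00000056_C/trial_r1_0/solution.py | max_distinct_elements_in_subarray
-- ===== SOURCE A (Python) =====
-- from collections import defaultdict
--
-- def max_distinct_elements_in_subarray(nums: list[int], k: int) -> int:
--     if k == 0 or len(nums) == 0:
--         return 0
--
--     freq = defaultdict(int)
--     current_distinct = 0
--     max_distinct = 0
--     left = 0
--
--     for right in range(len(nums)):
--         num = nums[right]
--         if freq[num] == 0:
--             current_distinct += 1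
--         freq[num] += 1
--
--         # Check if window exceeds size k
--         while right - left + 1 > k:
--             left_num = nums[left]
--             freq[left_num] -= 1
--             if freq[left_num] == 0:
--                 current_distinct -= 1
--             left += 1
--
--         # Update max when window is exactly size k
--         if right - left + 1 == k:
--             if current_distinct > max_distinct:
--                 max_distinct = current_distinct
--
--     return max_distinct
-- ===== SOURCE B (Python) =====
-- def max_distinct_elements_in_subarray(nums: list[int], k: int) -> int:
--     if k <= 0 or len(nums) == 0:
--         return 0
--     best = 0
--     for i in range(len(nums) - k + 1):
--         d = len(set(nums[i:i + k]))
--         if d > best: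
--             best = d
--     return best
-- ===== Notes on version B (the rewrite author's own statement) =====
-- stated objective: simpler
-- what changed: Replaces the incremental frequency-map sliding window with left-pointer maintenance by a direct loop over window starts that recomputes each window's distinct count as len(set(window)).
-- crash fix: For k < 0 with nonempty nums, A's while-loop marches the left pointer past the end of the list and raises IndexError; B's k <= 0 guard returns 0 immediately (no window of positive size exists). — e.g. on max_distinct_elements_in_subarray([1], -1): A raises IndexError, B returns 0
import Mathlib
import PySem

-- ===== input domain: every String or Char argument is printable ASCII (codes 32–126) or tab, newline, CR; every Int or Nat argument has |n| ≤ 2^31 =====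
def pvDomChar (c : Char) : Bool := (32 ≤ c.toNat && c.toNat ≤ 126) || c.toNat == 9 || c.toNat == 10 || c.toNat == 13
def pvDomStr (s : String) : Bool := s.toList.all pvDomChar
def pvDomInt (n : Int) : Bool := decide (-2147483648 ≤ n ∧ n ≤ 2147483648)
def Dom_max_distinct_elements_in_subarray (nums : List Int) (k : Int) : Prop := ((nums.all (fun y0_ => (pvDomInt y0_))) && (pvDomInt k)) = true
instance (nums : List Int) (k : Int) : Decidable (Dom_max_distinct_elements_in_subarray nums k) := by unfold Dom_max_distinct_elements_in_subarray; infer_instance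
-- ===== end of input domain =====

-- B replaces A's incremental frequency-map sliding window by a direct per-window
-- distinct-count recomputation (len(set(window)) per start index); objective: simpler.

-- ===== PORT A =====
-- the inner `while right - left + 1 > k` loop of A; freq is the defaultdict(int)
-- as its value map (exact: A only reads/writes freq[x], never iterates the dict)
def pvShrinkA (nums : List Int) (k right : Int) (left : Int) (freq : Int → Int) (cur : Int) :
    (Int → Int) × Int × Int :=
  if h : right - left + 1 > k then
    -- nums[left]; in range on every input where A does not raise (see Pre_)
    let ln := (PySem.List.pyGet? nums left).getD 0
    let freq' := fun y => if y = ln then freq y - 1 else freq y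
    let cur' := if freq' ln = 0 then cur - 1 else cur
    pvShrinkA nums k right (left + 1) freq' cur'
  else (freq, cur, left)
termination_by (right + 1 - k - left).toNat
decreasing_by omega

-- one iteration of A's `for right in range(len(nums))` loop; state = (freq, current_distinct, max_distinct, left)
def pvStepA (nums : List Int) (k : Int)
    (st : (Int → Int) × Int × Int × Int) (right : Int) :
    (Int → Int) × Int × Int × Int :=
  let num := (PySem.List.pyGet? nums right).getD 0   -- right ∈ range(len), always in range
  let cur1 := if st.1 num = 0 then st.2.1 + 1 else st.2.1
  let freq1 := fun y => if y = num then st.1 y + 1 else st.1 y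
  let s := pvShrinkA nums k right st.2.2.2 freq1 cur1
  let mx2 := if right - s.2.2 + 1 = k then (if s.2.1 > st.2.2.1 then s.2.1 else st.2.2.1) else st.2.2.1
  (s.1, s.2.1, mx2, s.2.2)

def max_distinct_elements_in_subarray (nums : List Int) (k : Int) : Int :=
  if k = 0 ∨ (nums.length : Int) = 0 then 0
  else ((PySem.List.pyRange 0 (nums.length : Int) 1).foldl (pvStepA nums k)
          ((fun _ => 0), 0, 0, 0)).2.2.1

-- ===== PORT B =====
-- body of B's `for i in range(len(nums) - k + 1)` loop
def pvStepB (nums : List Int) (k : Int) (best i : Int) : Int :=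
  let d := ((PySem.Set.ofList (PySem.List.slice nums (some i) (some (i + k)))).length : Int)
  if d > best then d else best

def max_distinct_elements_in_subarray_alt (nums : List Int) (k : Int) : Int :=
  if k ≤ 0 ∨ (nums.length : Int) = 0 then 0
  else (PySem.List.pyRange 0 ((nums.length : Int) - k + 1) 1).foldl (pvStepB nums k) 0

-- ===== PRECONDITION & SPEC =====
-- Pre_ excludes only k < 0 with nonempty nums: there A's while-loop marches `left`
-- past the end of the list and raises IndexError (no value is returned).
def Pre_max_distinct_elements_in_subarray (nums : List Int) (k : Int) : Prop :=
  0 ≤ k ∨ nums = []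
instance (nums : List Int) (k : Int) : Decidable (Pre_max_distinct_elements_in_subarray nums k) := by unfold Pre_max_distinct_elements_in_subarray; infer_instance
def pvWitness_max_distinct_elements_in_subarray : List Int × Int := ([1, 2, 1, 3], 2)

-- For k < 0 with nonempty nums, A raises IndexError (left pointer runs off the list); B returns 0 (no window of size k exists).
def Raises_max_distinct_elements_in_subarray (nums : List Int) (k : Int) : Prop :=
  k < 0 ∧ nums ≠ []
instance (nums : List Int) (k : Int) : Decidable (Raises_max_distinct_elements_in_subarray nums k) := by unfold Raises_max_distinct_elements_in_subarray; infer_instance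
def pvRaiseWitness_max_distinct_elements_in_subarray : List Int × Int := ([1], -1)
def pvRaiseWitnessOut_max_distinct_elements_in_subarray : Int := 0

def Spec_max_distinct_elements_in_subarray (nums : List Int) (k : Int) (out : Int) : Prop := out = max_distinct_elements_in_subarray_alt nums k
instance (nums : List Int) (k : Int) (out : Int) : Decidable (Spec_max_distinct_elements_in_subarray nums k out) := by unfold Spec_max_distinct_elements_in_subarray; infer_instance

-- ===== CLAIM (what is proved, stated in full; the proofs are below) =====
def Claim_equal_max_distinct_elements_in_subarray : Prop := ∀ (nums : List Int) (k : Int), Dom_max_distinct_elements_in_subarray nums k → Pre_max_distinct_elements_in_subarray nums k → Spec_max_distinct_elements_in_subarray nums k (max_distinct_elements_in_subarray nums k)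
def Claim_raises_max_distinct_elements_in_subarray : Prop := (∀ (nums : List Int) (k : Int), Dom_max_distinct_elements_in_subarray nums k → Raises_max_distinct_elements_in_subarray nums k → ¬ Pre_max_distinct_elements_in_subarray nums k) ∧ (Dom_max_distinct_elements_in_subarray (pvRaiseWitness_max_distinct_elements_in_subarray.1) (pvRaiseWitness_max_distinct_elements_in_subarray.2) ∧ Raises_max_distinct_elements_in_subarray (pvRaiseWitness_max_distinct_elements_in_subarray.1) (pvRaiseWitness_max_distinct_elements_in_subarray.2) ∧ max_distinct_elements_in_subarray_alt (pvRaiseWitness_max_distinct_elements_in_subarray.1) (pvRaiseWitness_max_distinct_elements_in_subarray.2) = pvRaiseWitnessOut_max_distinct_elements_in_subarray)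

-- ===== LEMMAS AND PROOFS =====

-- number of distinct elements of a list, as B computes it
def pvD (l : List Int) : Int := ((PySem.Set.ofList l).length : Int)
-- A's window after processing elements 0..r-1 (kN = k.toNat)
def pvWin (nums : List Int) (kN r : Nat) : List Int := (nums.drop (r - kN)).take (r - (r - kN))
-- B's running maximum over the windows that end before r
def pvM (nums : List Int) (k : Int) (r : Nat) : Int :=
  (PySem.List.pyRange 0 ((r : Int) - k + 1) 1).foldl (pvStepB nums k) 0

lemma pvD_eq_card (l : List Int) : pvD l = (l.toFinset.card : Int) := by
  unfold pvD
  congr 1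
  have hnd : (PySem.Set.ofList l).Nodup := PySem.Set.nodup_ofList l
  have hfs : (PySem.Set.ofList l).toFinset = l.toFinset := by
    ext x; simp [List.mem_toFinset, PySem.Set.mem_ofList]
  rw [← List.toFinset_card_of_nodup hnd, hfs]

lemma pvD_concat (l : List Int) (x : Int) :
    pvD (l ++ [x]) = pvD l + (if x ∈ l then 0 else 1) := by
  rw [pvD_eq_card, pvD_eq_card, List.toFinset_append]
  by_cases h : x ∈ l
  · simp [h]
  · have he : l.toFinset ∪ [x].toFinset = insert x l.toFinset := by simp [Finset.union_comm]
    rw [he, Finset.card_insert_of_notMem (by simp [h])]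
    simp [h]

lemma pvD_cons (x : Int) (t : List Int) :
    pvD (x :: t) = pvD t + (if x ∈ t then 0 else 1) := by
  rw [pvD_eq_card, pvD_eq_card]
  by_cases h : x ∈ t
  · simp [h]
  · rw [List.toFinset_cons, Finset.card_insert_of_notMem (by simp [h])]
    simp [h]

lemma pvInv (nums : List Int) (k : Int) (hk : 1 ≤ k) :
    ∀ r : Nat, r ≤ nums.length →
    (PySem.List.pyRange 0 (r : Int) 1).foldl (pvStepA nums k) ((fun _ => 0), 0, 0, 0)
      = ((fun x => ((pvWin nums k.toNat r).count x : Int)),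
         pvD (pvWin nums k.toNat r), pvM nums k r, ((r - k.toNat : Nat) : Int)) := by
  have hkk : (k.toNat : Int) = k := Int.toNat_of_nonneg (by omega)
  intro r
  induction r with
  | zero =>
    intro _
    have h1 : PySem.List.pyRange 0 ((0:Nat) : Int) 1 = [] :=
      PySem.List.pyRange_one_eq_nil (by omega)
    have h2 : PySem.List.pyRange 0 (-k + 1) 1 = [] :=
      PySem.List.pyRange_one_eq_nil (by omega)
    simp [h1, pvM, h2, pvWin, pvD, PySem.Set.ofList]
  | succ r ih =>
    intro hrn1
    have hrn : r < nums.length := by omega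
    set kN := k.toNat with hkN
    have hsplit : PySem.List.pyRange 0 ((r + 1 : Nat) : Int) 1
        = PySem.List.pyRange 0 (r : Int) 1 ++ [(r : Int)] := by
      push_cast
      exact PySem.List.pyRange_one_succ_right (by positivity)
    rw [hsplit, List.foldl_append, ih (by omega)]
    -- notation
    set a := r - kN with ha
    set w := pvWin nums kN r with hw
    have hwdef : w = (nums.drop a).take (r - a) := rfl
    have hnum : (PySem.List.pyGet? nums (r : Int)).getD 0 = nums[r] := by
      simp [PySem.List.pyGet?_natCast, List.getElem?_eq_getElem hrn]
    have hwin' : w ++ [nums[r]] = (nums.drop a).take (r + 1 - a) := by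
      have har : a ≤ r := by omega
      have h1 : r + 1 - a = (r - a) + 1 := by omega
      rw [hwdef, h1, List.take_add_one]
      have h2 : (nums.drop a)[r - a]? = some nums[r] := by
        rw [List.getElem?_drop]
        have h3 : a + (r - a) = r := by omega
        rw [h3, List.getElem?_eq_getElem hrn]
      simp [h2]
    show pvStepA nums k _ _ = _
    rw [pvStepA]
    simp only [hnum]
    -- freq after the insertion = counts of the extended window w'
    have hfreq1 : (fun y => if y = nums[r] then (List.count y w : Int) + 1 else (List.count y w : Int))
        = fun y => ((List.count y (w ++ [nums[r]]) : Int)) := by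
      funext y
      by_cases h : y = nums[r]
      · simp [h, List.count_append, List.count_cons]
      · simp [List.count_append, List.count_cons, h, Ne.symm h]
    have hcur1 : (if (List.count nums[r] w : Int) = 0 then pvD w + 1 else pvD w)
        = pvD (w ++ [nums[r]]) := by
      rw [pvD_concat]
      by_cases h : nums[r] ∈ w
      · have hc : 0 < List.count nums[r] w := List.count_pos_iff.mpr h
        rw [if_neg (by exact_mod_cast hc.ne'), if_pos h, add_zero]
      · have hc : List.count nums[r] w = 0 := List.count_eq_zero.mpr h
        rw [hc, Nat.cast_zero, if_pos rfl, if_neg h]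
    rw [hfreq1, hcur1]
    -- the shrink loop takes the extended window to the window of r+1
    have hsh : pvShrinkA nums k (r : Int) (a : Int)
        (fun y => ((List.count y (w ++ [nums[r]]) : Int))) (pvD (w ++ [nums[r]]))
        = ((fun y => ((List.count y (pvWin nums kN (r+1)) : Int))),
           pvD (pvWin nums kN (r+1)), (((r+1) - kN : Nat) : Int)) := by
      by_cases hc : r < kN
      · -- a = 0, window not yet full: the while loop does not run
        have ha0 : a = 0 := by omega
        have ha0' : (r + 1) - kN = 0 := by omega
        have hweq : pvWin nums kN (r+1) = w ++ [nums[r]] := by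
          rw [hwin']
          show List.take ((r+1) - ((r+1) - kN)) (List.drop ((r+1) - kN) nums) = _
          rw [ha0', ha0]
        rw [pvShrinkA, dif_neg (by omega), hweq, ha0, ha0']
      · -- window overfull by one: the while loop runs exactly once
        have hkr : kN ≤ r := by omega
        have han : a < nums.length := by omega
        have ha' : (r + 1) - kN = a + 1 := by omega
        set w2 := pvWin nums kN (r+1) with hw2
        have hw2def : w2 = List.take kN (List.drop (a+1) nums) := by
          show List.take ((r+1) - ((r+1) - kN)) (List.drop ((r+1) - kN) nums) = _
          rw [ha']
          congr 1
          omega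
        have hcons : w ++ [nums[r]] = nums[a] :: w2 := by
          rw [hwin', List.drop_eq_getElem_cons han]
          have h4 : r + 1 - a = kN + 1 := by omega
          rw [h4, List.take_succ_cons, ← hw2def]
        rw [pvShrinkA, dif_pos (by omega)]
        have hln : (PySem.List.pyGet? nums (a : Int)).getD 0 = nums[a] := by
          simp [PySem.List.pyGet?_natCast, List.getElem?_eq_getElem han]
        simp only [hln, hcons]
        have hfr : (fun y => if y = nums[a]
              then (List.count y (nums[a] :: w2) : Int) - 1
              else (List.count y (nums[a] :: w2) : Int))
            = fun y => ((List.count y w2 : Int)) := by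
          funext y
          by_cases h : y = nums[a] <;>
            simp [h, List.count_cons] <;> push_cast <;> omega
        have hcv : (if ((List.count nums[a] (nums[a] :: w2) : Int)) - 1 = 0
              then pvD (nums[a] :: w2) - 1 else pvD (nums[a] :: w2)) = pvD w2 := by
          rw [List.count_cons_self, pvD_cons]
          by_cases h : nums[a] ∈ w2
          · have hc2 : 0 < List.count nums[a] w2 := List.count_pos_iff.mpr h
            rw [if_neg (by push_cast; omega), if_pos h, add_zero]
          · have hc2 : List.count nums[a] w2 = 0 := List.count_eq_zero.mpr h
            rw [if_pos (by push_cast; omega), if_neg h]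
            ring
        rw [hfr]
        simp only [if_true]
        rw [hcv, pvShrinkA, dif_neg (by omega), ha']
        push_cast
        rfl
    rw [hsh]
    -- the max-update step matches B's fold step for the new full window (if any)
    refine Prod.ext rfl (Prod.ext rfl (Prod.ext ?_ rfl))
    show (if (r : Int) - (((r+1) - kN : Nat) : Int) + 1 = k
        then (if pvD (pvWin nums kN (r+1)) > pvM nums k r then pvD (pvWin nums kN (r+1)) else pvM nums k r)
        else pvM nums k r) = pvM nums k (r+1)
    by_cases hc : r < kN
    · have ha0' : ((r + 1) - kN : Nat) = 0 := by omega
      by_cases hfull : r + 1 = kN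
      · -- first full window: window starts at 0
        rw [ha0', if_pos (by push_cast; omega)]
        have hMr : pvM nums k r = 0 := by
          unfold pvM
          rw [PySem.List.pyRange_one_eq_nil (by omega)]
          rfl
        have hM1 : pvM nums k (r+1) = pvStepB nums k 0 0 := by
          unfold pvM
          have h5 : ((r+1 : Nat) : Int) - k + 1 = 0 + 1 := by push_cast; omega
          rw [h5, PySem.List.pyRange_one_singleton]
          rfl
        have hslice : PySem.List.slice nums (some 0) (some (0 + k)) = pvWin nums kN (r+1) := by
          rw [PySem.List.slice_toNat nums (by omega) (by omega)]
          show _ = List.take ((r+1) - ((r+1) - kN)) (List.drop ((r+1) - kN) nums)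
          rw [ha0']
          congr 1
          omega
        rw [hMr, hM1, pvStepB]
        simp only [hslice]
        rfl
      · -- window still not full: no update on either side
        rw [ha0', if_neg (by push_cast; omega)]
        unfold pvM
        rw [PySem.List.pyRange_one_eq_nil (by omega), PySem.List.pyRange_one_eq_nil (by push_cast; omega)]
    · -- sliding at full size: new window starts at r+1-k
      have hkr : kN ≤ r := by omega
      rw [if_pos (by push_cast; omega)]
      have hM1 : pvM nums k (r+1) = pvStepB nums k (pvM nums k r) ((r : Int) - k + 1) := by
        unfold pvM
        have h5 : ((r+1 : Nat) : Int) - k + 1 = ((r : Int) - k + 1) + 1 := by push_cast; ring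
        rw [h5, PySem.List.pyRange_one_succ_right (by omega), List.foldl_append]
        rfl
      have hslice : PySem.List.slice nums (some ((r : Int) - k + 1)) (some ((r : Int) - k + 1 + k))
          = pvWin nums kN (r+1) := by
        rw [PySem.List.slice_toNat nums (by omega) (by omega)]
        show _ = List.take ((r+1) - ((r+1) - kN)) (List.drop ((r+1) - kN) nums)
        have h6 : ((r : Int) - k + 1).toNat = (r+1) - kN := by omega
        rw [h6]
        congr 1
        omega
      rw [hM1, pvStepB]
      simp only [hslice]
      rfl

-- ===== VERDICT (by name: the statement is the Claim_ definition above) =====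
theorem max_distinct_elements_in_subarray_spec : Claim_equal_max_distinct_elements_in_subarray := by
  intro nums k hdom hpre
  unfold Spec_max_distinct_elements_in_subarray
  unfold max_distinct_elements_in_subarray max_distinct_elements_in_subarray_alt
  by_cases h0 : k = 0 ∨ (nums.length : Int) = 0
  · rw [if_pos h0, if_pos (by omega : k ≤ 0 ∨ (nums.length : Int) = 0)]
  · have hk : 1 ≤ k := by
      rcases hpre with hk0 | hnil
      · rcases lt_or_eq_of_le hk0 with h | h
        · omega
        · exact absurd h.symm (by tauto)
      · exfalso; exact h0 (Or.inr (by simp [hnil]))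
    rw [if_neg h0, if_neg (by omega : ¬(k ≤ 0 ∨ (nums.length : Int) = 0))]
    rw [pvInv nums k hk nums.length le_rfl]
    rfl

@[simp] theorem max_distinct_elements_in_subarray_raises : Claim_raises_max_distinct_elements_in_subarray := by
  unfold Claim_raises_max_distinct_elements_in_subarray
  constructor
  · intro nums k _ hr
    unfold Raises_max_distinct_elements_in_subarray at hr
    unfold Pre_max_distinct_elements_in_subarray
    rintro (h | h) <;> [omega; exact hr.2 h]
  · refine ⟨by decide, by decide, by decide⟩
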